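-- pv_equiv track=rewrite | github.com/Colin-Song/Twitter-Network-Analysis | buildgraph.py | convert_to_base2
-- ===== SOURCE A (Python) =====
-- def convert_to_base2(n, base, length):
--     '''
--     Convert a number to a given base, subject to a limit on the length
--     :param n: int to be converted
--     :param base: int representing conversion base
--     :param length: int for length of result
--     :return: list of digits representing number in new base
--     '''
--     if n == 0:
--         return [0] * length
--     result=[]
--     while n:
--         result.append(n % base)
--         n //= base
--     result.reverse()
--     while len(result)<length:
--         result.insert(0,0)
--     return result
-- ===== SOURCE B (Python) =====
-- def convert_to_base2(n, base, length):
--     '''Recursive most-significant-first digit decomposition with arithmetic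
--     left-padding: no reverse, no insert loop, no special case for n == 0.'''
--     def digits(m):
--         return [] if m == 0 else digits(m // base) + [m % base]
--     d = digits(n)
--     return [0] * (length - len(d)) + d
-- ===== Notes on version B (the rewrite author's own statement) =====
-- stated objective: simpler
-- what changed: A builds digits least-significant-first in a while loop, reverses, then pads with a while/insert(0,0) loop (plus a special n==0 branch); B is a recursive most-significant-first decomposition (digits(m//base)+[m%base]) with one arithmetic pad [0]*(length-len(d))+d and no special cases.
import Mathlib
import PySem

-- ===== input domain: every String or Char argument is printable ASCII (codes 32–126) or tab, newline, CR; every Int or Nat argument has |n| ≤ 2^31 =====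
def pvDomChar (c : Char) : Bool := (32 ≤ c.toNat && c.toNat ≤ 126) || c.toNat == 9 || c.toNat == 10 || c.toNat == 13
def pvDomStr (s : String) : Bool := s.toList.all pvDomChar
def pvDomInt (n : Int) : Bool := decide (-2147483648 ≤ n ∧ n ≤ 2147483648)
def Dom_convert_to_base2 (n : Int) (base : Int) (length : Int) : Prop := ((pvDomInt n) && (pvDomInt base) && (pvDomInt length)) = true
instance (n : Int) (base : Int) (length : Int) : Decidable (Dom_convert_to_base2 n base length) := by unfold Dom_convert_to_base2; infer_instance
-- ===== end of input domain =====

-- B replaces A's build-reverse-then-insert-pad loops by a recursive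
-- most-significant-first decomposition with one arithmetic pad (objective: simpler).

-- ===== PORT A =====
-- A's `while n:` loop, appending n % base and flooring n //= base (fuel only totalizes;
-- 2*|n|+2 steps suffice on every input where the Python loop terminates).
def pvALoop (base : Int) : Nat → Int → List Int → List Int
  | 0, _, acc => acc
  | f + 1, n, acc =>
      if n = 0 then acc
      else pvALoop base f (PySem.Int.floordiv n base) (acc ++ [PySem.Int.mod n base])

-- A's `while len(result) < length: result.insert(0, 0)` loop (fuel length.toNat suffices).
def pvAPad (length : Int) : Nat → List Int → List Int
  | 0, r => r
  | f + 1, r => if (r.length : Int) < length then pvAPad length f (0 :: r) else r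

def convert_to_base2 (n : Int) (base : Int) (length : Int) : List Int :=
  if n = 0 then List.replicate length.toNat 0   -- [0] * length (negative length → [])
  else pvAPad length length.toNat ((pvALoop base (2 * n.natAbs + 2) n []).reverse)

-- ===== PORT B =====
-- Source B's recursive helper digits(m) = [] if m == 0 else digits(m // base) + [m % base]
-- (same totalizing fuel as the A-side loop).
def pvDigits (base : Int) : Nat → Int → List Int
  | 0, _ => []
  | f + 1, n =>
      if n = 0 then []
      else pvDigits base f (PySem.Int.floordiv n base) ++ [PySem.Int.mod n base]

def convert_to_base2_alt (n : Int) (base : Int) (length : Int) : List Int :=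
  let d := pvDigits base (2 * n.natAbs + 2) n
  List.replicate (length - d.length).toNat 0 ++ d   -- [0] * (length - len(d)) + d

-- ===== PRECONDITION & SPEC =====
-- Pre_ excludes exactly the inputs where Python A does not return: base = 0 with n ≠ 0
-- (ZeroDivisionError) and base ∈ {1} or negative n with base ≥ 2 (infinite loop);
-- A returns on every input satisfying Pre_.
def Pre_convert_to_base2 (n : Int) (base : Int) (length : Int) : Prop :=
  n = 0 ∨ (0 ≤ n ∧ 2 ≤ base) ∨ base ≤ -2
instance (n : Int) (base : Int) (length : Int) : Decidable (Pre_convert_to_base2 n base length) := by unfold Pre_convert_to_base2; infer_instance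

def pvWitness_convert_to_base2 : Int × Int × Int := (11, 2, 6)

def Spec_convert_to_base2 (n : Int) (base : Int) (length : Int) (out : List Int) : Prop := out = convert_to_base2_alt n base length
instance (n : Int) (base : Int) (length : Int) (out : List Int) : Decidable (Spec_convert_to_base2 n base length out) := by unfold Spec_convert_to_base2; infer_instance

-- ===== CLAIM (what is proved, stated in full; the proofs are below) =====
def Claim_equal_convert_to_base2 : Prop := ∀ (n : Int) (base : Int) (length : Int), Dom_convert_to_base2 n base length → Pre_convert_to_base2 n base length → Spec_convert_to_base2 n base length (convert_to_base2 n base length)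

-- ===== LEMMAS AND PROOFS =====

-- A's accumulator loop collects exactly B's digit list, least-significant-first.
theorem pvALoop_eq_digits (base : Int) :
    ∀ (f : Nat) (n : Int) (acc : List Int),
      pvALoop base f n acc = acc ++ (pvDigits base f n).reverse := by
  intro f
  induction f with
  | zero => intro n acc; simp [pvALoop, pvDigits]
  | succ f ih =>
      intro n acc
      by_cases h : n = 0
      · simp [pvALoop, pvDigits, h]
      · simp [pvALoop, pvDigits, h, ih]

-- A's insert-padding loop is left-padding with zeros (whenever fuel covers the deficit).
theorem pvAPad_eq_replicate (length : Int) :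
    ∀ (f : Nat) (r : List Int), (length - r.length).toNat ≤ f →
      pvAPad length f r = List.replicate (length - r.length).toNat 0 ++ r := by
  intro f
  induction f with
  | zero =>
      intro r h
      have : (length - r.length).toNat = 0 := Nat.le_zero.mp h
      simp [pvAPad, this]
  | succ f ih =>
      intro r h
      by_cases hlt : (r.length : Int) < length
      · have hpos : 0 < (length - r.length).toNat := by omega
        have hstep : (length - ((0 : Int) :: r).length).toNat = (length - r.length).toNat - 1 := by
          simp only [List.length_cons]; omega
        have hf : (length - ((0 : Int) :: r).length).toNat ≤ f := by omega
        have := ih ((0 : Int) :: r) hf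
        simp only [pvAPad, hlt, if_true, this, hstep]
        rw [show (length - (r.length : Int)).toNat = ((length - r.length).toNat - 1) + 1 by omega]
        simp [List.replicate_succ']
      · have : (length - r.length).toNat = 0 := by omega
        simp [pvAPad, hlt, this]

-- ===== VERDICT (by name: the statement is the Claim_ definition above) =====
theorem convert_to_base2_spec : Claim_equal_convert_to_base2 := by
  intro n base length _ _
  unfold Spec_convert_to_base2 convert_to_base2 convert_to_base2_alt
  by_cases h : n = 0
  · simp [h, pvDigits]
  · have hfuel : (length - ((pvALoop base (2 * n.natAbs + 2) n []).reverse.length : Int)).toNat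
        ≤ length.toNat := by omega
    simp only [h, if_false]
    rw [pvAPad_eq_replicate length length.toNat _ hfuel,
        pvALoop_eq_digits base (2 * n.natAbs + 2) n []]
    simp
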